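-- pv_equiv track=rewrite | github.com/TcheloBorgas/AgoraSample | app/services/fallback_service.py | _missing_phrases_es
-- ===== SOURCE A (Python) =====
-- def _missing_phrases_es(fields: list[str]) -> list[str]:
--     order = (
--         "organizer_name",
--         "organizer_email",
--         "title",
--         "start",
--         "duration_minutes",
--         "participants",
--         "target_meeting",
--         "new_start",
--     )
--     labels = {
--         "organizer_name": "tu nombre completo",
--         "organizer_email": "tu correo electrónico (para la invitación)",
--         "title": "el asunto o título de la reunión",
--         "start": "la fecha y la hora",
--         "duration_minutes": "la duración en minutos",
--         "participants": "los participantes por correo (si los hay)",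
--         "target_meeting": "qué reunión (título, hora o participantes)",
--         "new_start": "la nueva hora para reagendar",
--     }
--     seen = set()
--     out: list[str] = []
--     for key in order:
--         if key in fields and key not in seen:
--             seen.add(key)
--             out.append(labels.get(key, key))
--     for f in fields:
--         if f not in seen:
--             out.append(labels.get(f, f))
--     return out
-- ===== SOURCE B (Python) =====
-- def _missing_phrases_es(fields: list[str]) -> list[str]:
--     order = (
--         "organizer_name",
--         "organizer_email",
--         "title",
--         "start",
--         "duration_minutes",
--         "participants",
--         "target_meeting",
--         "new_start",
--     )
--     labels = {
--         "organizer_name": "tu nombre completo",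
--         "organizer_email": "tu correo electrónico (para la invitación)",
--         "title": "el asunto o título de la reunión",
--         "start": "la fecha y la hora",
--         "duration_minutes": "la duración en minutos",
--         "participants": "los participantes por correo (si los hay)",
--         "target_meeting": "qué reunión (título, hora o participantes)",
--         "new_start": "la nueva hora para reagendar",
--     }
--     index = {k: i for i, k in enumerate(order)}
--     out: list[str] = []
--     prev = None
--     # Stable sort groups known keys in canonical order up front and leaves the
--     # unknown fields, in original order, at the end; one scan then emits each
--     # known key once (adjacent-duplicate skip) and every unknown occurrence.
--     for f in sorted(fields, key=lambda f: index.get(f, len(order))):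
--         if f in index:
--             if f != prev:
--                 out.append(labels[f])
--         else:
--             out.append(labels.get(f, f))
--         prev = f
--     return out
-- ===== Notes on version B (the rewrite author's own statement) =====
-- stated objective: alternative
-- what changed: Replaces A's two-loop seen-set merge by an index-table-plus-stable-sort decomposition: sort the fields by their position in the order tuple (unknown fields keyed past the end), then one scan emits each known key once via adjacent-duplicate skipping and every unknown occurrence via labels.get.
import Mathlib
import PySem

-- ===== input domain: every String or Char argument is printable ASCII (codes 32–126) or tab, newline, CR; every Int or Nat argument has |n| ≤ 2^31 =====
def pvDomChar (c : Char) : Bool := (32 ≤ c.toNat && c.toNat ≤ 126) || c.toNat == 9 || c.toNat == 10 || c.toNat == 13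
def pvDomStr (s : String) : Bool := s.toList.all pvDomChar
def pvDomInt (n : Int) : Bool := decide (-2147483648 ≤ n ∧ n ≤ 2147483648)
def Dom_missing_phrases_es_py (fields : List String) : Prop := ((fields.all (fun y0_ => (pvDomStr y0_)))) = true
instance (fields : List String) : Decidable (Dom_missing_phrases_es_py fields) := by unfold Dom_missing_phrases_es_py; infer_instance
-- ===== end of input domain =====

-- B replaces A's two-loop seen-set merge by an index table plus a stable sort on the
-- key's position (unknown fields keyed past the end) followed by one scan that skips
-- adjacent duplicate known keys; objective: alternative.

-- ===== PORT A =====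
-- shared constants: the `order` tuple and `labels` dict literal, identical in both Pythons.
def mpOrder : List String :=
  ["organizer_name", "organizer_email", "title", "start",
   "duration_minutes", "participants", "target_meeting", "new_start"]

def mpLabels : PySem.Dict String String := PySem.Dict.ofList
  [("organizer_name", "tu nombre completo"),
   ("organizer_email", "tu correo electrónico (para la invitación)"),
   ("title", "el asunto o título de la reunión"),
   ("start", "la fecha y la hora"),
   ("duration_minutes", "la duración en minutos"),
   ("participants", "los participantes por correo (si los hay)"),
   ("target_meeting", "qué reunión (título, hora o participantes)"),
   ("new_start", "la nueva hora para reagendar")]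

-- body of A's first for-loop ('if key in fields and key not in seen: seen.add(key); out.append(labels.get(key, key))')
def mpStep1 (fields : List String) (st : PySem.Set String × List String) (key : String) :
    PySem.Set String × List String :=
  if fields.contains key && !(PySem.Set.contains st.1 key) then
    (PySem.Set.add st.1 key, st.2 ++ [PySem.Dict.getD mpLabels key key])
  else st

def missing_phrases_es_py (fields : List String) : List String :=
  let st := mpOrder.foldl (mpStep1 fields) (PySem.Set.empty, [])
  -- second for-loop: 'for f in fields: if f not in seen: out.append(labels.get(f, f))'
  fields.foldl (fun out f =>
    if !(PySem.Set.contains st.1 f) then out ++ [PySem.Dict.getD mpLabels f f] else out) st.2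

-- ===== PORT B =====
-- B uses the same `order`/`labels` literals as A; the shared constants above are reused.
-- 'index = {k: i for i, k in enumerate(order)}'
def mpIndex : PySem.Dict String Int :=
  PySem.Dict.ofList ((PySem.List.enumerate mpOrder).map (fun p => (p.2, p.1)))

-- body of B's single for-loop; state = (out, prev); 'f != prev' with prev initially None
-- is 'some f ≠ prev' on Option String.  labels[f] on the known branch is exact as getD
-- because every key of `index` is a key of `labels`.
def mpStepB (st : List String × Option String) (f : String) : List String × Option String :=
  (if PySem.Dict.contains mpIndex f then
     (if some f ≠ st.2 then st.1 ++ [PySem.Dict.getD mpLabels f f] else st.1)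
   else st.1 ++ [PySem.Dict.getD mpLabels f f],
   some f)

-- 'sorted(fields, key=lambda f: index.get(f, len(order)))' — len(order) = 8
def missing_phrases_es_py_alt (fields : List String) : List String :=
  ((PySem.List.sorted fields (fun f => PySem.Dict.getD mpIndex f 8)).foldl
      mpStepB ([], none)).1

-- ===== PRECONDITION & SPEC =====
def Spec_missing_phrases_es_py (fields : List String) (out : List String) : Prop := out = missing_phrases_es_py_alt fields
instance (fields : List String) (out : List String) : Decidable (Spec_missing_phrases_es_py fields out) := by unfold Spec_missing_phrases_es_py; infer_instance

-- ===== CLAIM (what is proved, stated in full; the proofs are below) =====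
def Claim_equal_missing_phrases_es_py : Prop := ∀ (fields : List String), Dom_missing_phrases_es_py fields → Spec_missing_phrases_es_py fields (missing_phrases_es_py fields)

-- ===== LEMMAS AND PROOFS =====

-- the common canonical form both sides are reduced to
def mpCanon (fields : List String) : List String :=
  ((mpOrder.filter (fun k => fields.contains k)).map (fun k => PySem.Dict.getD mpLabels k k))
  ++ ((fields.filter (fun f => !(PySem.Dict.contains mpLabels f))).map
      (fun f => PySem.Dict.getD mpLabels f f))

-- ---------- A side ----------

-- A's first loop, characterised: over a duplicate-free key list none of whose keys is
-- already in `seen`, it appends exactly the keys present in `fields`, in key order.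
theorem mpLoop1
    (fields : List String) :
    ∀ (ks : List String) (seen : PySem.Set String) (out : List String),
      ks.Nodup → (∀ k ∈ ks, PySem.Set.contains seen k = false) →
      ks.foldl (mpStep1 fields) (seen, out)
        = (seen ++ ks.filter (fun k => fields.contains k),
           out ++ (ks.filter (fun k => fields.contains k)).map
             (fun k => PySem.Dict.getD mpLabels k k)) := by
  intro ks
  induction ks with
  | nil => intro seen out _ _; simp
  | cons k rest ih =>
    intro seen out hnd hfresh
    have hk : PySem.Set.contains seen k = false := hfresh k (by simp)
    have hnd' : rest.Nodup := (List.nodup_cons.mp hnd).2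
    have hknr : k ∉ rest := (List.nodup_cons.mp hnd).1
    have hkmem : k ∉ seen := by
      intro hmem
      have := (PySem.Set.contains_iff seen k).mpr hmem
      rw [hk] at this; exact absurd this (by simp)
    by_cases hc : fields.contains k = true
    · have hcm : k ∈ fields := by
        simpa using hc
      have hadd : PySem.Set.add seen k = seen ++ [k] := by
        simp [PySem.Set.add, hkmem]
      have hfresh' : ∀ k' ∈ rest, PySem.Set.contains (seen ++ [k]) k' = false := by
        intro k' hk'
        have h1 : PySem.Set.contains seen k' = false := hfresh k' (by simp [hk'])
        have hne : k' ≠ k := fun h => hknr (h ▸ hk')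
        have h1' : k' ∉ seen := by
          intro hmem
          have := (PySem.Set.contains_iff seen k').mpr hmem
          rw [h1] at this; exact absurd this (by simp)
        simp only [PySem.Set.contains_eq_listContains]
        simp [hne, h1']
      simp only [List.foldl_cons, mpStep1, hc, hk, Bool.not_false, Bool.and_true,
        reduceIte, hadd]
      rw [ih (seen ++ [k]) (out ++ [PySem.Dict.getD mpLabels k k]) hnd' hfresh']
      simp [hcm]
    · have hc' : fields.contains k = false := by simpa using hc
      have hcm : k ∉ fields := by simpa using hc'
      simp only [List.foldl_cons, mpStep1, hc', Bool.false_and, Bool.false_eq_true, if_false]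
      rw [ih seen out hnd' (fun k' hk' => hfresh k' (by simp [hk']))]
      simp [hcm]

-- mpOrder has no duplicate keys
theorem mpOrder_nodup : mpOrder.Nodup := by decide

-- membership in mpLabels is membership in mpOrder
theorem mpLabels_mk : mpLabels = PySem.Dict.mk
  [("organizer_name", "tu nombre completo"),
   ("organizer_email", "tu correo electrónico (para la invitación)"),
   ("title", "el asunto o título de la reunión"),
   ("start", "la fecha y la hora"),
   ("duration_minutes", "la duración en minutos"),
   ("participants", "los participantes por correo (si los hay)"),
   ("target_meeting", "qué reunión (título, hora o participantes)"),
   ("new_start", "la nueva hora para reagendar")] := by decide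

theorem mpLabels_contains (f : String) :
    PySem.Dict.contains mpLabels f = mpOrder.contains f := by
  rw [mpLabels_mk]
  simp only [PySem.Dict.contains_mk, mpOrder, List.contains_eq_any_beq, List.any_cons,
    List.any_nil, Bool.or_false]
  simp [Bool.beq_eq_decide_eq, eq_comm]

theorem mpA_canon (fields : List String) :
    missing_phrases_es_py fields = mpCanon fields := by
  unfold missing_phrases_es_py mpCanon
  have hfresh : ∀ k ∈ mpOrder, PySem.Set.contains PySem.Set.empty k = false := by
    intro k _; rfl
  rw [mpLoop1 fields mpOrder PySem.Set.empty [] mpOrder_nodup hfresh]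
  simp only [PySem.Set.empty, List.nil_append]
  refine Eq.trans (PySem.List.foldl_append_if
    (fun f => !(PySem.Set.contains (mpOrder.filter (fun k => fields.contains k)) f))
    (fun f => PySem.Dict.getD mpLabels f f) fields _) ?_
  have hB2 : fields.filter (fun f => !(PySem.Dict.contains mpLabels f))
      = fields.filter
          (fun f => !(PySem.Set.contains (mpOrder.filter (fun k => fields.contains k)) f)) := by
    apply List.filter_congr
    intro f hf
    have hff : fields.contains f = true := by
      simpa using hf
    rw [mpLabels_contains]
    congr 1
    simp only [PySem.Set.contains_eq_listContains]
    simp [List.mem_filter]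
    exact fun _ => hf
  rw [hB2]

-- ---------- B side ----------

-- the sort key of B
def mpKey (f : String) : Int := PySem.Dict.getD mpIndex f 8

theorem mpIndex_mk : mpIndex = PySem.Dict.mk
  [("organizer_name", 0), ("organizer_email", 1), ("title", 2), ("start", 3),
   ("duration_minutes", 4), ("participants", 5), ("target_meeting", 6),
   ("new_start", 7)] := by decide

-- closed form of the key
theorem mpKey_eq (f : String) : mpKey f =
    (if "organizer_name" = f then 0 else if "organizer_email" = f then 1
     else if "title" = f then 2 else if "start" = f then 3
     else if "duration_minutes" = f then 4 else if "participants" = f then 5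
     else if "target_meeting" = f then 6 else if "new_start" = f then 7 else 8) := by
  rw [show mpKey f = (PySem.Dict.get? mpIndex f).getD 8 from rfl, mpIndex_mk]
  simp only [PySem.Dict.get?_mk_cons, beq_iff_eq]
  split_ifs <;> rfl

theorem mpKey_mem (f : String) :
    mpKey f ∈ ([0, 1, 2, 3, 4, 5, 6, 7, 8] : List Int) := by
  rw [mpKey_eq]; split_ifs <;> simp

theorem mpIndex_contains (f : String) :
    PySem.Dict.contains mpIndex f = mpOrder.contains f := by
  rw [mpIndex_mk]
  simp only [PySem.Dict.contains_mk, mpOrder, List.contains_eq_any_beq, List.any_cons,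
    List.any_nil, Bool.or_false]
  simp [Bool.beq_eq_decide_eq, eq_comm]

-- buckets of the stable sort
def mpBC (vs : List Int) (xs : List String) : List String :=
  vs.flatMap (fun v => xs.filter (fun f => mpKey f == v))

-- appending an element whose key lies outside vs does not change those buckets
theorem mpBC_snoc_notmem (x : String) (vs : List Int) (xs : List String)
    (h : mpKey x ∉ vs) : mpBC vs (xs ++ [x]) = mpBC vs xs := by
  unfold mpBC
  apply List.flatMap_congr
  intro v hv
  have hxv : (mpKey x == v) = false := by
    simp; intro hc; exact h (by rw [hc]; exact hv)
  simp [List.filter_append, hxv]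

-- insertBy walks past a prefix it does not go before
theorem mpInsertBy_append_left {α : Type} (before : α → α → Bool) (x : α) :
    ∀ (l r : List α), (∀ y ∈ l, before x y = false) →
      PySem.List.insertBy before x (l ++ r) = l ++ PySem.List.insertBy before x r := by
  intro l
  induction l with
  | nil => intro r _; simp
  | cons y ys ih =>
    intro r h
    have hy : before x y = false := h y (by simp)
    simp only [List.cons_append, PySem.List.insertBy, hy, Bool.false_eq_true, if_false]
    rw [ih r (fun y' hy' => h y' (by simp [hy']))]

-- insertBy goes to the front of a list it goes before everywhere
theorem mpInsertBy_front {α : Type} (before : α → α → Bool) (x : α) (r : List α)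
    (h : ∀ y ∈ r, before x y = true) :
    PySem.List.insertBy before x r = x :: r := by
  cases r with
  | nil => rfl
  | cons y ys => simp [PySem.List.insertBy, h y (by simp)]

-- one stable-insertion step preserves the bucket decomposition
theorem mpInsert_bc (x : String) :
    ∀ (vs : List Int) (xs : List String), vs.Pairwise (· < ·) → mpKey x ∈ vs →
      PySem.List.insertBy (fun a b => decide (mpKey a < mpKey b)) x (mpBC vs xs)
        = mpBC vs (xs ++ [x]) := by
  intro vs
  induction vs with
  | nil => intro xs _ h; exact absurd h (by simp)
  | cons v rest ih =>
    intro xs hpw hx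
    have hrest_gt : ∀ w ∈ rest, v < w := (List.pairwise_cons.mp hpw).1
    have hpw' : rest.Pairwise (· < ·) := (List.pairwise_cons.mp hpw).2
    by_cases hxv : mpKey x = v
    · -- x lands at the end of bucket v; later buckets are unchanged
      have hrest_out : mpKey x ∉ rest := by
        intro hm; exact absurd (hrest_gt _ hm) (by rw [hxv]; exact lt_irrefl v)
      have hskip : ∀ y ∈ xs.filter (fun f => mpKey f == v),
          (decide (mpKey x < mpKey y)) = false := by
        intro y hy
        have : mpKey y = v := by simpa using (List.mem_filter.mp hy).2
        simp [this, hxv]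
      have hfront : ∀ y ∈ mpBC rest xs, (decide (mpKey x < mpKey y)) = true := by
        intro y hy
        obtain ⟨w, hw, hyw⟩ := List.mem_flatMap.mp hy
        have : mpKey y = w := by simpa using (List.mem_filter.mp hyw).2
        simp only [decide_eq_true_eq, this, hxv]
        exact hrest_gt w hw
      have lhs : PySem.List.insertBy (fun a b => decide (mpKey a < mpKey b)) x
            (mpBC (v :: rest) xs)
          = xs.filter (fun f => mpKey f == v) ++ (x :: mpBC rest xs) := by
        show PySem.List.insertBy _ x
            (xs.filter (fun f => mpKey f == v) ++ mpBC rest xs) = _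
        rw [mpInsertBy_append_left _ x _ _ hskip, mpInsertBy_front _ x _ hfront]
      rw [lhs]
      show _ = (xs ++ [x]).filter (fun f => mpKey f == v) ++ mpBC rest (xs ++ [x])
      rw [mpBC_snoc_notmem x rest xs hrest_out]
      simp [List.filter_append, hxv]
    · -- x belongs to a later bucket
      have hx' : mpKey x ∈ rest := by
        rcases List.mem_cons.mp hx with h | h
        · exact absurd h hxv
        · exact h
      have hgt : v < mpKey x := hrest_gt _ hx'
      have hskip : ∀ y ∈ xs.filter (fun f => mpKey f == v),
          (decide (mpKey x < mpKey y)) = false := by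
        intro y hy
        have : mpKey y = v := by simpa using (List.mem_filter.mp hy).2
        simp [this]; omega
      have hxvb : (mpKey x == v) = false := by simpa using hxv
      show PySem.List.insertBy _ x
          (xs.filter (fun f => mpKey f == v) ++ mpBC rest xs)
        = (xs ++ [x]).filter (fun f => mpKey f == v) ++ mpBC rest (xs ++ [x])
      rw [mpInsertBy_append_left _ x _ _ hskip, ih xs hpw' hx']
      simp [List.filter_append, hxvb]

-- the stable sort by mpKey is exactly the bucket concatenation
theorem mpSorted_bc (fields : List String) :
    PySem.List.sorted fields (fun f => PySem.Dict.getD mpIndex f 8)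
      = mpBC [0, 1, 2, 3, 4, 5, 6, 7, 8] fields := by
  rw [show (fun f => PySem.Dict.getD mpIndex f 8) = mpKey from rfl]
  rw [PySem.List.sorted_eq_foldl_insertBy]
  induction fields using List.reverseRecOn with
  | nil => simp [mpBC]
  | append_singleton xs x ih =>
    rw [List.foldl_append, List.foldl_cons, List.foldl_nil, ih]
    exact mpInsert_bc x _ xs (by decide) (mpKey_mem x)

-- bucket membership test: the key equals v exactly when the field is s
theorem mpKey_bucket (f s : String) (v : Int)
    (h1 : mpKey s = v) (h2 : ∀ g, mpKey g = v → g = s) :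
    (mpKey f == v) = (f == s) := by
  by_cases hf : f = s
  · subst hf; simp [h1]
  · have hk : mpKey f ≠ v := fun h => hf (h2 f h)
    simp [hk, hf]

-- the known buckets, keyed 0–7, are the per-key filters in mpOrder order
set_option maxHeartbeats 1000000 in
theorem mpBC_known (fields : List String) :
    mpBC [0, 1, 2, 3, 4, 5, 6, 7] fields
      = mpOrder.flatMap (fun k => fields.filter (fun f => f == k)) := by
  have e0 : fields.filter (fun f => mpKey f == (0 : Int))
      = fields.filter (fun f => f == "organizer_name") :=
    List.filter_congr (fun f _ => mpKey_bucket f "organizer_name" 0 (by decide)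
      (by intro g hg; rw [mpKey_eq] at hg;
          split_ifs at hg <;> first | omega | (subst_vars; rfl)))
  have e1 : fields.filter (fun f => mpKey f == (1 : Int))
      = fields.filter (fun f => f == "organizer_email") :=
    List.filter_congr (fun f _ => mpKey_bucket f "organizer_email" 1 (by decide)
      (by intro g hg; rw [mpKey_eq] at hg;
          split_ifs at hg <;> first | omega | (subst_vars; rfl)))
  have e2 : fields.filter (fun f => mpKey f == (2 : Int))
      = fields.filter (fun f => f == "title") :=
    List.filter_congr (fun f _ => mpKey_bucket f "title" 2 (by decide)
      (by intro g hg; rw [mpKey_eq] at hg;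
          split_ifs at hg <;> first | omega | (subst_vars; rfl)))
  have e3 : fields.filter (fun f => mpKey f == (3 : Int))
      = fields.filter (fun f => f == "start") :=
    List.filter_congr (fun f _ => mpKey_bucket f "start" 3 (by decide)
      (by intro g hg; rw [mpKey_eq] at hg;
          split_ifs at hg <;> first | omega | (subst_vars; rfl)))
  have e4 : fields.filter (fun f => mpKey f == (4 : Int))
      = fields.filter (fun f => f == "duration_minutes") :=
    List.filter_congr (fun f _ => mpKey_bucket f "duration_minutes" 4 (by decide)
      (by intro g hg; rw [mpKey_eq] at hg;
          split_ifs at hg <;> first | omega | (subst_vars; rfl)))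
  have e5 : fields.filter (fun f => mpKey f == (5 : Int))
      = fields.filter (fun f => f == "participants") :=
    List.filter_congr (fun f _ => mpKey_bucket f "participants" 5 (by decide)
      (by intro g hg; rw [mpKey_eq] at hg;
          split_ifs at hg <;> first | omega | (subst_vars; rfl)))
  have e6 : fields.filter (fun f => mpKey f == (6 : Int))
      = fields.filter (fun f => f == "target_meeting") :=
    List.filter_congr (fun f _ => mpKey_bucket f "target_meeting" 6 (by decide)
      (by intro g hg; rw [mpKey_eq] at hg;
          split_ifs at hg <;> first | omega | (subst_vars; rfl)))
  have e7 : fields.filter (fun f => mpKey f == (7 : Int))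
      = fields.filter (fun f => f == "new_start") :=
    List.filter_congr (fun f _ => mpKey_bucket f "new_start" 7 (by decide)
      (by intro g hg; rw [mpKey_eq] at hg;
          split_ifs at hg <;> first | omega | (subst_vars; rfl)))
  simp only [mpBC, mpOrder, List.flatMap_cons, List.flatMap_nil, List.append_nil,
    e0, e1, e2, e3, e4, e5, e6, e7]

-- the last bucket, keyed 8, is the unknown fields in original order
theorem mpBC_unknown (fields : List String) :
    fields.filter (fun f => mpKey f == (8 : Int))
      = fields.filter (fun f => !(PySem.Dict.contains mpLabels f)) := by
  apply List.filter_congr; intro f _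
  rw [mpLabels_contains]
  by_cases hf : f ∈ mpOrder
  · have hk : mpKey f ≠ 8 := by
      have hf' := hf
      simp only [mpOrder, List.mem_cons, List.not_mem_nil, or_false] at hf'
      rcases hf' with rfl | rfl | rfl | rfl | rfl | rfl | rfl | rfl <;> decide
    simp [hk, hf]
  · have hk : mpKey f = 8 := by
      rw [mpKey_eq]
      split_ifs <;> first | rfl | (exfalso; subst_vars; exact absurd (by decide) hf)
    simp [hk, hf]

-- the scan over an all-unknown suffix appends every label, whatever the state
theorem mpScanUnknown :
    ∀ (us : List String) (st : List String × Option String),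
      (∀ f ∈ us, PySem.Dict.contains mpIndex f = false) →
      (us.foldl mpStepB st).1 = st.1 ++ us.map (fun f => PySem.Dict.getD mpLabels f f) := by
  intro us
  induction us with
  | nil => intro st _; simp
  | cons u rest ih =>
    intro st h
    have hu : PySem.Dict.contains mpIndex u = false := h u (by simp)
    simp only [List.foldl_cons, mpStepB, hu, Bool.false_eq_true, if_false]
    rw [ih _ (fun f hf => h f (by simp [hf]))]
    simp

-- skipping a run of copies of a known key already equal to prev
theorem mpScanRep (k : String) (hk : PySem.Dict.contains mpIndex k = true) :
    ∀ (m : Nat) (out : List String),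
      ((List.replicate m k).foldl mpStepB (out, some k)) = (out, some k) := by
  intro m
  induction m with
  | zero => intro out; simp
  | succ n ih =>
    intro out
    simp only [List.replicate_succ, List.foldl_cons, mpStepB, hk]
    simpa using ih out

-- the scan over the known buckets emits each present key once, in key order
theorem mpScanKnown (fields : List String) :
    ∀ (ks : List String) (out : List String) (p : Option String),
      ks.Nodup → (∀ k ∈ ks, PySem.Dict.contains mpIndex k = true) →
      (∀ k ∈ ks, p ≠ some k) →
      ∃ q, (ks.flatMap (fun k => fields.filter (fun f => f == k))).foldl mpStepB (out, p)
        = (out ++ (ks.filter (fun k => fields.contains k)).map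
              (fun k => PySem.Dict.getD mpLabels k k), q)
        ∧ (q = p ∨ ∃ k ∈ ks, q = some k) := by
  intro ks
  induction ks with
  | nil => intro out p _ _ _; exact ⟨p, by simp, Or.inl rfl⟩
  | cons k rest ih =>
    intro out p hnd hknown hfresh
    have hkk : PySem.Dict.contains mpIndex k = true := hknown k (by simp)
    have hnd' : rest.Nodup := (List.nodup_cons.mp hnd).2
    have hknr : k ∉ rest := (List.nodup_cons.mp hnd).1
    rw [List.flatMap_cons, List.foldl_append, List.filter_beq]
    by_cases hmem : k ∈ fields
    · have hcnt : 0 < fields.count k := List.count_pos_iff.mpr hmem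
      obtain ⟨m, hm⟩ : ∃ m, fields.count k = m + 1 :=
        ⟨fields.count k - 1, by omega⟩
      have hpk : some k ≠ p := fun h => hfresh k (by simp) h.symm
      rw [hm, List.replicate_succ, List.foldl_cons]
      have hstep : mpStepB (out, p) k = (out ++ [PySem.Dict.getD mpLabels k k], some k) := by
        simp [mpStepB, hkk, hpk]
      rw [hstep, mpScanRep k hkk m]
      obtain ⟨q, hq, hq2⟩ := ih (out ++ [PySem.Dict.getD mpLabels k k]) (some k) hnd'
        (fun k' h => hknown k' (by simp [h]))
        (fun k' h hkq => hknr (by rw [Option.some_inj.mp hkq]; exact h))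
      refine ⟨q, ?_, ?_⟩
      · rw [hq]
        have hck : fields.contains k = true := by simpa using hmem
        simp [hmem]
      · rcases hq2 with h | ⟨k', h1, h2⟩
        · exact Or.inr ⟨k, by simp, h⟩
        · exact Or.inr ⟨k', by simp [h1], h2⟩
    · have hc : fields.contains k = false := by simpa using hmem
      have hcnt : fields.count k = 0 := List.count_eq_zero.mpr hmem
      rw [hcnt, List.replicate_zero, List.foldl_nil]

      obtain ⟨q, hq, hq2⟩ := ih out p hnd' (fun k' h => hknown k' (by simp [h]))
        (fun k' h => hfresh k' (by simp [h]))
      refine ⟨q, ?_, ?_⟩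
      · rw [hq]; simp [hmem]
      · rcases hq2 with h | ⟨k', h1, h2⟩
        · exact Or.inl h
        · exact Or.inr ⟨k', by simp [h1], h2⟩

theorem mpB_canon (fields : List String) :
    missing_phrases_es_py_alt fields = mpCanon fields := by
  unfold missing_phrases_es_py_alt mpCanon
  rw [mpSorted_bc]
  have hsplit : mpBC [0, 1, 2, 3, 4, 5, 6, 7, 8] fields
      = mpBC [0, 1, 2, 3, 4, 5, 6, 7] fields
        ++ fields.filter (fun f => mpKey f == (8 : Int)) := by
    simp [mpBC, List.flatMap_cons]
  rw [hsplit, mpBC_known, mpBC_unknown, List.foldl_append]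
  obtain ⟨q, hq, _⟩ := mpScanKnown fields mpOrder [] none mpOrder_nodup
    (by decide) (fun k _ => by simp)
  rw [hq]
  rw [mpScanUnknown _ _ ?side]
  · simp
  case side =>
    intro f hf
    have : (PySem.Dict.contains mpLabels f) = false := by
      simpa using (List.mem_filter.mp hf).2
    rw [mpIndex_contains, ← mpLabels_contains, this]

-- ===== VERDICT (by name: the statement is the Claim_ definition above) =====
theorem missing_phrases_es_py_spec : Claim_equal_missing_phrases_es_py := by
  intro fields _
  unfold Spec_missing_phrases_es_py
  rw [mpA_canon, mpB_canon]
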